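-- pv_equiv track=rewrite | github.com/girip11/advent_of_code | aoc_2021/day_15/python/chiton.py | iterate_tiles
-- ===== SOURCE A (Python) =====
-- from typing import Iterator, List, Set, Tuple
--
-- def iterate_tiles(
--     tile_size: Tuple[int, int], expand_by: int, start_tile: int
-- ) -> Iterator[Tuple[int, int]]:
--     tile_num: int = 0
--
--     # iterate by row and column of tiles
--     for i in range(0, expand_by):
--         for j in range(0, expand_by):  # pylint: disable=invalid-name
--             if tile_num >= start_tile:
--                 yield (tile_size[0] * i, tile_size[1] * j)
--             tile_num += 1
-- ===== SOURCE B (Python) =====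
-- def iterate_tiles(tile_size, expand_by, start_tile):
--     if expand_by > 0:
--         for n in range(max(0, start_tile), expand_by * expand_by):
--             i, j = divmod(n, expand_by)
--             yield (tile_size[0] * i, tile_size[1] * j)
-- ===== Notes on version B (the rewrite author's own statement) =====
-- stated objective: simpler
-- what changed: Replaces the nested row/column loops with their iterate-and-skip tile counter by a single flat loop over the linear tile index starting directly at max(0, start_tile), recovering row/column with divmod.
import Mathlib
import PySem

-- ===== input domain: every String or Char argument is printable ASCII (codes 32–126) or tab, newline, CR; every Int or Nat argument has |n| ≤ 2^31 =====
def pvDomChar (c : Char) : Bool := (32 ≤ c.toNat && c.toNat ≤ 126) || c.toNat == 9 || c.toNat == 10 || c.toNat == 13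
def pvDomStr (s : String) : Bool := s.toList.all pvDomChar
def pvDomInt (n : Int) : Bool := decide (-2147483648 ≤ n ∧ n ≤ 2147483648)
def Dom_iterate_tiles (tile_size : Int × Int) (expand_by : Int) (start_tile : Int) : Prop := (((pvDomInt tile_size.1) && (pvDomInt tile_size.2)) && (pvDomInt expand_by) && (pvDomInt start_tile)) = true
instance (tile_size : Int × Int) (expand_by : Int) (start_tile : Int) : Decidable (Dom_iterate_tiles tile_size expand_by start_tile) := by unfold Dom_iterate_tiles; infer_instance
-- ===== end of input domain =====

-- B replaces A's nested loops and skip-counter by one flat loop over the linear tile index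
-- starting directly at max(0, start_tile), recovering row/column with divmod (simpler).

-- ===== PORT A =====
def iterate_tiles (tile_size : Int × Int) (expand_by : Int) (start_tile : Int) : List (Int × Int) :=
  ((PySem.List.pyRange 0 expand_by 1).foldl
    (fun st i =>
      (PySem.List.pyRange 0 expand_by 1).foldl
        (fun st j =>
          (st.1 + 1,
           if st.1 ≥ start_tile then st.2 ++ [(tile_size.1 * i, tile_size.2 * j)] else st.2))
        st)
    ((0 : Int), ([] : List (Int × Int)))).2

-- ===== PORT B =====
def iterate_tiles_alt (tile_size : Int × Int) (expand_by : Int) (start_tile : Int) : List (Int × Int) :=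
  if 0 < expand_by then
    (PySem.List.pyRange (max 0 start_tile) (expand_by * expand_by) 1).map
      (fun n => (tile_size.1 * PySem.Int.floordiv n expand_by,
                 tile_size.2 * PySem.Int.mod n expand_by))
  else []

-- ===== PRECONDITION & SPEC =====
def Spec_iterate_tiles (tile_size : Int × Int) (expand_by : Int) (start_tile : Int) (out : List (Int × Int)) : Prop := out = iterate_tiles_alt tile_size expand_by start_tile
instance (tile_size : Int × Int) (expand_by : Int) (start_tile : Int) (out : List (Int × Int)) : Decidable (Spec_iterate_tiles tile_size expand_by start_tile out) := by unfold Spec_iterate_tiles; infer_instance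

-- ===== CLAIM (what is proved, stated in full; the proofs are below) =====
def Claim_equal_iterate_tiles : Prop := ∀ (tile_size : Int × Int) (expand_by : Int) (start_tile : Int), Dom_iterate_tiles tile_size expand_by start_tile → Spec_iterate_tiles tile_size expand_by start_tile (iterate_tiles tile_size expand_by start_tile)

-- ===== LEMMAS AND PROOFS =====

-- The inner (column) loop appends one yield per counter value m ∈ [t, t+n) with s ≤ m.
lemma inner_loop (a b s i t : Int) (acc : List (Int × Int)) (n : Nat) :
    (PySem.List.pyRange 0 (n : Int) 1).foldl
      (fun st j => (st.1 + 1, if st.1 ≥ s then st.2 ++ [(a * i, b * j)] else st.2)) (t, acc)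
    = (t + n,
       acc ++ ((PySem.List.pyRange t (t + n) 1).filter (fun m => decide (s ≤ m))).map
         (fun m => (a * i, b * (m - t)))) := by
  induction n generalizing acc with
  | zero => simp [PySem.List.pyRange_one_eq_nil (le_refl t)]
  | succ k ih =>
    rw [show ((k + 1 : Nat) : Int) = (k : Int) + 1 by push_cast; ring,
        PySem.List.pyRange_one_succ_right (by exact_mod_cast Int.natCast_nonneg k),
        List.foldl_append, ih]
    simp only [List.foldl_cons, List.foldl_nil]
    rw [show t + ((k : Int) + 1) = (t + k) + 1 by ring,
        PySem.List.pyRange_one_succ_right (by omega : t ≤ t + (k : Int)),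
        List.filter_append, List.map_append]
    by_cases h : s ≤ t + (k : Int)
    · simp [h]
    · simp [h]

-- One outer row i contributes exactly the linear indices m ∈ [i*e, (i+1)*e).
lemma outer_loop (a b s e : Int) (he : 0 < e) (n : Nat) :
    (PySem.List.pyRange 0 (n : Int) 1).foldl
      (fun st i =>
        (PySem.List.pyRange 0 e 1).foldl
          (fun st j => (st.1 + 1, if st.1 ≥ s then st.2 ++ [(a * i, b * j)] else st.2)) st)
      ((0 : Int), ([] : List (Int × Int)))
    = ((n : Int) * e,
       ((PySem.List.pyRange 0 ((n : Int) * e) 1).filter (fun m => decide (s ≤ m))).map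
         (fun m => (a * PySem.Int.floordiv m e, b * PySem.Int.mod m e))) := by
  induction n with
  | zero => simp [PySem.List.pyRange_one_eq_nil]
  | succ k ih =>
    rw [show ((k + 1 : Nat) : Int) = (k : Int) + 1 by push_cast; ring,
        PySem.List.pyRange_one_succ_right (by exact_mod_cast Int.natCast_nonneg k),
        List.foldl_append, ih]
    simp only [List.foldl_cons, List.foldl_nil]
    have hc : e = ((e.toNat : Nat) : Int) := by omega
    rw [hc, inner_loop a b s (k : Int) ((k : Int) * ((e.toNat : Nat) : Int)), ← hc]
    have hsplit : PySem.List.pyRange 0 (((k : Int) + 1) * e) 1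
        = PySem.List.pyRange 0 ((k : Int) * e) 1
          ++ PySem.List.pyRange ((k : Int) * e) ((k : Int) * e + e) 1 := by
      have h1 : (0 : Int) ≤ (k : Int) * e := by positivity
      have h2 : (k : Int) * e ≤ ((k : Int) + 1) * e := by nlinarith
      rw [PySem.List.pyRange_one_append 0 ((k : Int) * e) (((k : Int) + 1) * e) h1 h2]
      congr 1
      congr 1
      ring
    simp only [Prod.mk.injEq]
    refine ⟨by ring, ?_⟩
    rw [hsplit, List.filter_append, List.map_append]
    congr 1
    apply List.map_congr_left
    intro m hm
    have hm' : m ∈ PySem.List.pyRange ((k : Int) * e) ((k : Int) * e + e) 1 :=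
      List.mem_of_mem_filter hm
    rw [PySem.List.mem_pyRange_one] at hm'
    have hfd : PySem.Int.floordiv m e = (k : Int) := by
      rw [PySem.Int.floordiv_eq_iff_of_pos he]
      constructor
      · linarith [hm'.1]
      · nlinarith [hm'.2]
    have hmod : PySem.Int.mod m e = m - (k : Int) * e := by
      have := PySem.Int.floordiv_mul_add_mod m e
      rw [hfd] at this
      omega
    rw [hfd, hmod]

-- Filtering range(0, N) by (s ≤ ·) is range(max(0,s), N).
lemma filter_range (s N : Int) :
    (PySem.List.pyRange 0 N 1).filter (fun m => decide (s ≤ m))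
      = PySem.List.pyRange (max 0 s) N 1 := by
  by_cases hs : s ≤ 0
  · rw [max_eq_left hs]
    apply List.filter_eq_self.mpr
    intro m hm
    rw [PySem.List.mem_pyRange_one] at hm
    simp
    omega
  · rw [max_eq_right (by omega : (0:Int) ≤ s)]
    by_cases hN : s ≤ N
    · rw [PySem.List.pyRange_one_append 0 s N (by omega) hN, List.filter_append]
      have h1 : (PySem.List.pyRange 0 s 1).filter (fun m => decide (s ≤ m)) = [] := by
        apply List.filter_eq_nil_iff.mpr
        intro m hm
        rw [PySem.List.mem_pyRange_one] at hm
        simp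
        omega
      have h2 : (PySem.List.pyRange s N 1).filter (fun m => decide (s ≤ m))
          = PySem.List.pyRange s N 1 := by
        apply List.filter_eq_self.mpr
        intro m hm
        rw [PySem.List.mem_pyRange_one] at hm
        simp
        omega
      rw [h1, h2, List.nil_append]
    · rw [PySem.List.pyRange_one_eq_nil (by omega : N ≤ s)]
      apply List.filter_eq_nil_iff.mpr
      intro m hm
      rw [PySem.List.mem_pyRange_one] at hm
      simp
      omega

-- ===== VERDICT (by name: the statement is the Claim_ definition above) =====
theorem iterate_tiles_spec : Claim_equal_iterate_tiles := by
  intro ts e s _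
  unfold Spec_iterate_tiles iterate_tiles iterate_tiles_alt
  by_cases he : 0 < e
  · have hc : e = ((e.toNat : Nat) : Int) := by omega
    rw [if_pos he]
    conv_lhs => rw [hc]
    rw [outer_loop ts.1 ts.2 s ((e.toNat : Nat) : Int) (by omega) e.toNat, ← hc]
    rw [show ((PySem.List.pyRange 0 (e*e) 1).filter (fun m => decide (s ≤ m))) = PySem.List.pyRange (max 0 s) (e*e) 1 from filter_range s (e*e)]
  · rw [if_neg he]
    rw [PySem.List.pyRange_one_eq_nil (by omega : e ≤ 0)]
    simp
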